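-- pv_equiv track=rewrite | github.com/TADIYOS49/competitive_programming | E_360_degree_s.py | solve
-- ===== SOURCE A (Python) =====
-- def solve(a,n,sumi,i):
--     if i == n:
--         if sumi == 0 or sumi%360 == 0:
--             return True
--         else:
--             return False
--     left = solve(a,n,sumi+a[i],i+1)
--     right = solve(a,n,sumi-a[i],i+1)
--     return left or right
-- ===== SOURCE B (Python) =====
-- def solve(a, n, sumi, i):
--     reach = {sumi % 360}
--     j = i
--     while j != n:
--         x = a[j]
--         reach = {(r + x) % 360 for r in reach} | {(r - x) % 360 for r in reach}
--         j += 1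
--     return 0 in reach
-- ===== Notes on version B (the rewrite author's own statement) =====
-- stated objective: alternative
-- what changed: Replaces A's branching recursion over all sign choices with a single forward pass that maintains the set of residues mod 360 reachable by some sign assignment.
import Mathlib
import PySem

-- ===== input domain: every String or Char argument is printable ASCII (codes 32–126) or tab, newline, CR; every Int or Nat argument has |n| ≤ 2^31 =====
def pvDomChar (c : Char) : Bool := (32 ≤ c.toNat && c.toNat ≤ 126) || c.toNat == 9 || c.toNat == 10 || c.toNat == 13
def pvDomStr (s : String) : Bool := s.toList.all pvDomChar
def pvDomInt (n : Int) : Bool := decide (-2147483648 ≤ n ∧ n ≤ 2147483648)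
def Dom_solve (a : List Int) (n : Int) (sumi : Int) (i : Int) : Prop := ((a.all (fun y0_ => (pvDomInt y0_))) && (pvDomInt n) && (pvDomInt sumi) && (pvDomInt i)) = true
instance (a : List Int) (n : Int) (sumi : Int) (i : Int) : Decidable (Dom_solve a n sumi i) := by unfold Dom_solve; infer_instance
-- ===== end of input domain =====

-- B replaces A's branching ±sign recursion by a single forward pass maintaining the
-- set of reachable residues mod 360; equivalence of the RETURN value is proved on Pre_.

-- ===== PORT A =====
-- A's recursion on i is ported with fuel (n - i).toNat: inside Pre_ the fuel is
-- exactly the number of remaining recursive steps, so the port follows A step for step.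
def solveAux (a : List Int) (n : Int) : Nat → Int → Int → Bool
  | 0, sumi, i =>
    if i = n then (decide (sumi = 0) || decide (PySem.Int.mod sumi 360 = 0)) else false
  | fuel+1, sumi, i =>
    if i = n then (decide (sumi = 0) || decide (PySem.Int.mod sumi 360 = 0))
    else
      match PySem.List.pyGet? a i with   -- a[i]; none = IndexError, excluded by Pre_
      | none => false
      | some x =>
        solveAux a n fuel (sumi + x) (i + 1) || solveAux a n fuel (sumi - x) (i + 1)

def solve (a : List Int) (n : Int) (sumi : Int) (i : Int) : Bool :=
  solveAux a n (n - i).toNat sumi i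

-- ===== PORT B =====
-- one step of B's loop body: reach = {(r+x)%360 for r in reach} | {(r-x)%360 for r in reach}
def altStep (reach : PySem.Set Int) (x : Int) : PySem.Set Int :=
  PySem.Set.union
    (PySem.Set.ofList (reach.map (fun r => PySem.Int.mod (r + x) 360)))
    (reach.map (fun r => PySem.Int.mod (r - x) 360))

-- B's while loop 'while j != n: reach = altStep(reach, a[j]); j += 1', ported with fuel
-- (n - i).toNat = the number of iterations the loop makes inside Pre_
def altAux (a : List Int) (n : Int) : Nat → Int → PySem.Set Int → PySem.Set Int
  | 0, _, reach => reach
  | fuel+1, j, reach =>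
    if j = n then reach
    else altAux a n fuel (j + 1) (altStep reach (PySem.List.pyGetD a j 0))  -- x = a[j]; in range under Pre_

def solve_alt (a : List Int) (n : Int) (sumi : Int) (i : Int) : Bool :=
  PySem.Set.contains
    (altAux a n (n - i).toNat i (PySem.Set.add PySem.Set.empty (PySem.Int.mod sumi 360))) 0

-- ===== PRECONDITION & SPEC =====
-- Pre_ is exactly where Python A returns: i ≤ n (otherwise the recursion never reaches
-- the base case) and, when any step is taken, every index j ∈ [i, n) — including
-- Python's negative-index wraparound — is a valid index of a.
def Pre_solve (a : List Int) (n : Int) (sumi : Int) (i : Int) : Prop :=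
  i ≤ n ∧ (i < n → -(a.length : Int) ≤ i ∧ n ≤ (a.length : Int))
instance (a : List Int) (n : Int) (sumi : Int) (i : Int) : Decidable (Pre_solve a n sumi i) := by
  unfold Pre_solve; infer_instance

def pvWitness_solve : List Int × Int × Int × Int := ([120, 240, 100], 3, 0, 0)

def Spec_solve (a : List Int) (n : Int) (sumi : Int) (i : Int) (out : Bool) : Prop := out = solve_alt a n sumi i
instance (a : List Int) (n : Int) (sumi : Int) (i : Int) (out : Bool) : Decidable (Spec_solve a n sumi i out) := by unfold Spec_solve; infer_instance

-- ===== CLAIM (what is proved, stated in full; the proofs are below) =====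
def Claim_equal_solve : Prop := ∀ (a : List Int) (n : Int) (sumi : Int) (i : Int), Dom_solve a n sumi i → Pre_solve a n sumi i → Spec_solve a n sumi i (solve a n sumi i)

-- ===== LEMMAS AND PROOFS =====

-- the common mathematical skeleton: the ± recursion over the list of traversed elements
def solveL : List Int → Int → Bool
  | [], s => decide (s % 360 = 0)
  | x :: xs, s => solveL xs (s + x) || solveL xs (s - x)

theorem solveL_congr_mod : ∀ (xs : List Int) (s t : Int), s % 360 = t % 360 →
    solveL xs s = solveL xs t := by
  intro xs
  induction xs with
  | nil => intro s t h; simp [solveL, h]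
  | cons x xs ih =>
    intro s t h
    have h1 : (s + x) % 360 = (t + x) % 360 := by omega
    have h2 : (s - x) % 360 = (t - x) % 360 := by omega
    simp [solveL, ih _ _ h1, ih _ _ h2]

theorem base_eq (s : Int) :
    (decide (s = 0) || decide (PySem.Int.mod s 360 = 0)) = decide (s % 360 = 0) := by
  rw [PySem.Int.mod_eq_emod_of_pos (by norm_num : (0:Int) < 360)]
  by_cases h : s = 0 <;> simp [h]

theorem pyGet?_eq_some_getD {a : List Int} {j : Int}
    (h : PySem.Raise.InRange a.length j) :
    PySem.List.pyGet? a j = some (PySem.List.pyGetD a j 0) := by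
  obtain ⟨h1, h2⟩ := h
  unfold PySem.List.pyGetD PySem.List.pyGet? PySem.List.pyIdx?
  by_cases h0 : 0 ≤ j
  · have hlt : j.toNat < a.length := by omega
    simp [h0, h2]
  · have hne : -j ≤ (a.length : Int) := by omega
    have hpos : 0 < (-j).toNat := by omega
    have hlt : a.length - (-j).toNat < a.length := by omega
    simp [h0, h1, List.getElem?_eq_getElem hlt]

-- A's fueled recursion computes solveL of the traversed elements
theorem solveAux_eq_solveL : ∀ (k : Nat) (a : List Int) (n i sumi : Int),
    i + k = n → (∀ j, i ≤ j → j < n → PySem.Raise.InRange a.length j) →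
    solveAux a n k sumi i
      = solveL ((PySem.List.pyRange i n 1).map (fun j => PySem.List.pyGetD a j 0)) sumi := by
  intro k
  induction k with
  | zero =>
    intro a n i sumi hk _
    have hin : i = n := by omega
    subst hin
    rw [PySem.List.pyRange_one_eq_nil le_rfl]
    simp only [solveAux, List.map_nil, solveL]
    exact base_eq sumi
  | succ k ih =>
    intro a n i sumi hk hv
    have hlt : i < n := by omega
    rw [PySem.List.pyRange_one_cons hlt]
    have hget := pyGet?_eq_some_getD (hv i le_rfl hlt)
    have hk' : i + 1 + (k : Int) = n := by omega
    have hv' : ∀ j, i + 1 ≤ j → j < n → PySem.Raise.InRange a.length j := by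
      intro j hj1 hj2; exact hv j (by omega) hj2
    simp only [solveAux, if_neg (by omega : ¬ i = n), hget, List.map_cons, solveL,
      ih a n (i+1) (sumi + PySem.List.pyGetD a i 0) hk' hv',
      ih a n (i+1) (sumi - PySem.List.pyGetD a i 0) hk' hv']

-- every element of a reach-set built by B is its own residue mod 360
theorem step_mem_mod {reach : PySem.Set Int} {x r : Int} (h : r ∈ altStep reach x) :
    r % 360 = r := by
  unfold altStep at h
  rw [PySem.Set.mem_union, PySem.Set.mem_ofList] at h
  rcases h with h | h <;>
  · obtain ⟨s, _, hs⟩ := List.mem_map.mp h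
    rw [← hs, PySem.Int.mod_eq_emod_of_pos (by norm_num : (0:Int) < 360)]
    omega

theorem mem_altStep {reach : PySem.Set Int} {x r : Int} :
    r ∈ altStep reach x ↔
      ∃ s ∈ reach, r = PySem.Int.mod (s + x) 360 ∨ r = PySem.Int.mod (s - x) 360 := by
  unfold altStep
  rw [PySem.Set.mem_union, PySem.Set.mem_ofList]
  simp only [List.mem_map]
  constructor
  · rintro (⟨s, hs, he⟩ | ⟨s, hs, he⟩)
    · exact ⟨s, hs, Or.inl he.symm⟩
    · exact ⟨s, hs, Or.inr he.symm⟩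
  · rintro ⟨s, hs, he | he⟩
    · exact Or.inl ⟨s, hs, he.symm⟩
    · exact Or.inr ⟨s, hs, he.symm⟩

-- B's fold over the element list computes "some residue in reach leads to 0"
theorem foldl_altStep_spec : ∀ (xs : List Int) (reach : PySem.Set Int),
    (∀ r ∈ reach, r % 360 = r) →
    ((xs.foldl altStep reach).contains 0 = true ↔ ∃ r ∈ reach, solveL xs r = true) := by
  intro xs
  induction xs with
  | nil =>
    intro reach hinv
    rw [List.foldl_nil, PySem.Set.contains_iff]
    constructor
    · intro h0; exact ⟨0, h0, by simp [solveL]⟩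
    · rintro ⟨r, hr, hsl⟩
      have : r % 360 = 0 := by simpa [solveL] using hsl
      have := hinv r hr
      have : r = 0 := by omega
      exact this ▸ hr
  | cons x xs ih =>
    intro reach hinv
    rw [List.foldl_cons, ih (altStep reach x) (fun r hr => step_mem_mod hr)]
    have hmodpos : (0:Int) < 360 := by norm_num
    constructor
    · rintro ⟨r, hr, hsl⟩
      obtain ⟨s, hs, he⟩ := mem_altStep.mp hr
      refine ⟨s, hs, ?_⟩
      rcases he with he | he <;>
        rw [he, PySem.Int.mod_eq_emod_of_pos hmodpos] at hsl
      · rw [solveL, solveL_congr_mod xs (s + x) ((s + x) % 360) (by omega), hsl]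
        simp
      · rw [solveL, solveL_congr_mod xs (s - x) ((s - x) % 360) (by omega), hsl]
        simp
    · rintro ⟨s, hs, hsl⟩
      rw [solveL, Bool.or_eq_true] at hsl
      rcases hsl with hsl | hsl
      · refine ⟨PySem.Int.mod (s + x) 360, mem_altStep.mpr ⟨s, hs, Or.inl rfl⟩, ?_⟩
        rw [PySem.Int.mod_eq_emod_of_pos hmodpos,
          solveL_congr_mod xs ((s + x) % 360) (s + x) (by omega)]
        exact hsl
      · refine ⟨PySem.Int.mod (s - x) 360, mem_altStep.mpr ⟨s, hs, Or.inr rfl⟩, ?_⟩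
        rw [PySem.Int.mod_eq_emod_of_pos hmodpos,
          solveL_congr_mod xs ((s - x) % 360) (s - x) (by omega)]
        exact hsl

-- B's fueled while loop is the fold of altStep over the traversed elements
theorem altAux_eq_foldl : ∀ (k : Nat) (a : List Int) (n i : Int) (S : PySem.Set Int),
    i + k = n →
    altAux a n k i S
      = ((PySem.List.pyRange i n 1).map (fun j => PySem.List.pyGetD a j 0)).foldl altStep S := by
  intro k
  induction k with
  | zero =>
    intro a n i S hk
    rw [PySem.List.pyRange_one_eq_nil (by omega)]
    simp [altAux]
  | succ k ih =>
    intro a n i S hk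
    have hlt : i < n := by omega
    rw [PySem.List.pyRange_one_cons hlt, List.map_cons, List.foldl_cons,
      ← ih a n (i + 1) _ (by omega)]
    simp only [altAux, if_neg (by omega : ¬ i = n)]

theorem solve_alt_eq_solveL (a : List Int) (n sumi i : Int) (hin : i ≤ n) :
    solve_alt a n sumi i
      = solveL ((PySem.List.pyRange i n 1).map (fun j => PySem.List.pyGetD a j 0)) sumi := by
  unfold solve_alt
  rw [altAux_eq_foldl (n - i).toNat a n i _ (by omega)]
  have hmodpos : (0:Int) < 360 := by norm_num
  have hinv : ∀ r ∈ PySem.Set.add PySem.Set.empty (PySem.Int.mod sumi 360), r % 360 = r := by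
    intro r hr
    rw [PySem.Set.mem_add] at hr
    rcases hr with hr | hr
    · simp [PySem.Set.empty] at hr
    · rw [hr, PySem.Int.mod_eq_emod_of_pos hmodpos]; omega
  rcases hB : solveL ((PySem.List.pyRange i n 1).map (fun j => PySem.List.pyGetD a j 0)) sumi with _ | _
  · rw [Bool.eq_false_iff]
    intro hc
    obtain ⟨r, hr, hsl⟩ := (foldl_altStep_spec _ _ hinv).mp hc
    rw [PySem.Set.mem_add] at hr
    rcases hr with hr | hr
    · simp [PySem.Set.empty] at hr
    · rw [hr, PySem.Int.mod_eq_emod_of_pos hmodpos,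
        solveL_congr_mod _ (sumi % 360) sumi (by omega), hB] at hsl
      exact Bool.false_ne_true hsl
  · apply (foldl_altStep_spec _ _ hinv).mpr
    refine ⟨PySem.Int.mod sumi 360, by rw [PySem.Set.mem_add]; right; rfl, ?_⟩
    rw [PySem.Int.mod_eq_emod_of_pos hmodpos,
      solveL_congr_mod _ (sumi % 360) sumi (by omega)]
    exact hB

-- ===== VERDICT (by name: the statement is the Claim_ definition above) =====
theorem solve_spec : Claim_equal_solve := by
  intro a n sumi i _ hpre
  obtain ⟨hin, hrange⟩ := hpre
  unfold Spec_solve solve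
  rw [solve_alt_eq_solveL a n sumi i hin]
  apply solveAux_eq_solveL
  · omega
  · intro j hj1 hj2
    have := hrange (by omega)
    exact ⟨by omega, by omega⟩
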